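-- pv_equiv track=rewrite | github.com/overmind-core/overmind | overmind_core/api/v1/endpoints/utils/prompts.py | are_criteria_same
-- ===== SOURCE A (Python) =====
-- def normalize_criteria_rules(rules: list[str]) -> set:
--     """
--     Normalize a list of criteria rules for comparison.
--     Converts to lowercase and removes duplicates (order-independent).
--
--     Args:
--         rules: List of criteria rules
--
--     Returns:
--         Set of normalized rules (lowercase, stripped, no duplicates)
--     """
--     return {rule.strip().lower() for rule in rules if rule.strip()}
--
-- def are_criteria_same(
--     old_criteria: dict[str, list[str]] | None, new_criteria: dict[str, list[str]]
-- ) -> bool: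
--     """
--     Compare two criteria dictionaries to check if they're the same.
--     Comparison is case-insensitive and order-independent.
--
--     Args:
--         old_criteria: Existing evaluation criteria (or None)
--         new_criteria: New evaluation criteria to compare
--
--     Returns:
--         True if criteria are the same, False otherwise
--
--     Examples:
--         >>> old = {"correctness": ["Rule 1", "Rule 2"]}
--         >>> new = {"correctness": ["rule 1", "rule 2"]}
--         >>> are_criteria_same(old, new)
--         True
--
--         >>> old = {"correctness": ["Rule 2", "Rule 1"]}
--         >>> new = {"correctness": ["Rule 1", "Rule 2"]}
--         >>> are_criteria_same(old, new)
--         True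
--
--         >>> old = {"correctness": ["Rule 1"]}
--         >>> new = {"correctness": ["Rule 1", "Rule 2"]}
--         >>> are_criteria_same(old, new)
--         False
--     """
--     if old_criteria is None:
--         return False
--
--     # Check if they have the same keys
--     if set(old_criteria.keys()) != set(new_criteria.keys()):
--         return False
--
--     # Compare normalized rule sets for each metric
--     for metric_name in old_criteria.keys():
--         old_rules = normalize_criteria_rules(old_criteria[metric_name])
--         new_rules = normalize_criteria_rules(new_criteria[metric_name])
--
--         if old_rules != new_rules:
--             return False
--
--     return True
-- ===== SOURCE B (Python) =====
-- def are_criteria_same(old_criteria, new_criteria):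
--     if old_criteria is None:
--         return False
--
--     def canonical(criteria):
--         # canonical serialization: per metric a sorted list of normalized rules,
--         # all metrics sorted by name
--         return sorted(
--             ((name, sorted({r.strip().lower() for r in rules if r.strip()}))
--              for name, rules in criteria.items()),
--             key=lambda item: item[0],
--         )
--
--     return canonical(old_criteria) == canonical(new_criteria)
-- ===== Notes on version B (the rewrite author's own statement) =====
-- stated objective: alternative
-- what changed: B compares one canonical serialization per dict -- each rule list normalized to a sorted deduplicated list and the (name, rules) pairs sorted by name -- with a single list equality, instead of A's staged key-set comparison plus per-key set-equality loop with early exit.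
import Mathlib
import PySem

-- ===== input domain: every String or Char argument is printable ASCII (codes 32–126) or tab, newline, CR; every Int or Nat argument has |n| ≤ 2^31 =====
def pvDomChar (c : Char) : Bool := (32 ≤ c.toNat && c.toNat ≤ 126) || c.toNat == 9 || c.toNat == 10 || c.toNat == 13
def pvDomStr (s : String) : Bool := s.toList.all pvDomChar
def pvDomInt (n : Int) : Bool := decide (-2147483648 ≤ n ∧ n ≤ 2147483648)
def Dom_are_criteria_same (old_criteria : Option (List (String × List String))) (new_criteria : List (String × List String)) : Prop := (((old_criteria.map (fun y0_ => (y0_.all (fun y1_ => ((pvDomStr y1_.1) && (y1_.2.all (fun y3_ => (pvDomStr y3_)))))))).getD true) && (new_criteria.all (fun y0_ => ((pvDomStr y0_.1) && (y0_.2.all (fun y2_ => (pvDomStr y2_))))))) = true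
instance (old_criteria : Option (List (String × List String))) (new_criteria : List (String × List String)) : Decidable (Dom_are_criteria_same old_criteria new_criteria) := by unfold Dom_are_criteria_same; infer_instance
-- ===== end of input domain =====

-- B replaces A's key-set comparison plus per-key set-equality loop by comparing one
-- canonical sorted serialization of each dict (objective: alternative algorithm).

-- ===== PORT A =====
-- {rule.strip().lower() for rule in rules if rule.strip()}
def normalize_criteria_rules (rules : List String) : PySem.Set String :=
  PySem.Set.ofList
    ((rules.filter (fun rule => !(PySem.Str.strip rule == ""))).map
      (fun rule => PySem.Str.lower (PySem.Str.strip rule)))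

def are_criteria_same (old_criteria : Option (List (String × List String))) (new_criteria : List (String × List String)) : Bool :=
  match old_criteria with
  | none => false
  | some old =>
    -- if set(old_criteria.keys()) != set(new_criteria.keys()): return False
    if !(PySem.Set.equal (PySem.Set.ofList (old.map (·.1))) (PySem.Set.ofList (new_criteria.map (·.1)))) then
      false
    else
      -- for metric_name in old_criteria.keys(): … (early exit 'return False' = all)
      old.all (fun kv =>
        PySem.Set.equal
          (normalize_criteria_rules ((PySem.Dict.mk old).getD kv.1 []))
          (normalize_criteria_rules ((PySem.Dict.mk new_criteria).getD kv.1 [])))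

-- ===== PORT B =====
-- sorted({r.strip().lower() for r in rules if r.strip()}) — sorted of a set without
-- a key, order-independent, so exact
def pvNormSortedRules (rules : List String) : List String :=
  PySem.List.sorted
    (PySem.Set.ofList
      ((rules.filter (fun r => !(PySem.Str.strip r == ""))).map
        (fun r => PySem.Str.lower (PySem.Str.strip r))))
    (fun x => x) false

-- sorted((name, sorted({…})) for name, rules in criteria.items(), key=item[0]);
-- .items() over a dict is a per-entry map
def pvCanonical (criteria : List (String × List String)) : List (String × List String) :=
  PySem.List.sorted (criteria.map (fun kv => (kv.1, pvNormSortedRules kv.2)))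
    (fun item => item.1) false

def are_criteria_same_alt (old_criteria : Option (List (String × List String))) (new_criteria : List (String × List String)) : Bool :=
  match old_criteria with
  | none => false
  | some old => pvCanonical old == pvCanonical new_criteria

-- ===== PRECONDITION & SPEC =====
-- Pre_ only requires distinct keys in each association list: the lists model Python
-- dicts, which cannot carry duplicate keys, so no actual Python input is excluded.
def Pre_are_criteria_same (old_criteria : Option (List (String × List String))) (new_criteria : List (String × List String)) : Prop :=
  ((old_criteria.getD []).map Prod.fst).Nodup ∧ (new_criteria.map Prod.fst).Nodup
instance (old_criteria : Option (List (String × List String))) (new_criteria : List (String × List String)) : Decidable (Pre_are_criteria_same old_criteria new_criteria) := by unfold Pre_are_criteria_same; infer_instance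

def pvWitness_are_criteria_same : (Option (List (String × List String))) × (List (String × List String)) :=
  (some [("a", ["X", "y "])], [("a", [" x", "Y"])])

def Spec_are_criteria_same (old_criteria : Option (List (String × List String))) (new_criteria : List (String × List String)) (out : Bool) : Prop := out = are_criteria_same_alt old_criteria new_criteria
instance (old_criteria : Option (List (String × List String))) (new_criteria : List (String × List String)) (out : Bool) : Decidable (Spec_are_criteria_same old_criteria new_criteria out) := by unfold Spec_are_criteria_same; infer_instance

-- ===== CLAIM (what is proved, stated in full; the proofs are below) =====
def Claim_equal_are_criteria_same : Prop := ∀ (old_criteria : Option (List (String × List String))) (new_criteria : List (String × List String)), Dom_are_criteria_same old_criteria new_criteria → Pre_are_criteria_same old_criteria new_criteria → Spec_are_criteria_same old_criteria new_criteria (are_criteria_same old_criteria new_criteria)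

-- ===== LEMMAS AND PROOFS =====

-- the entry-wise canonicalization B sorts
def pvF (kv : String × List String) : String × List String := (kv.1, pvNormSortedRules kv.2)

theorem pv_map_fst_map_f (l : List (String × List String)) :
    (l.map pvF).map Prod.fst = l.map Prod.fst := by
  simp [pvF]

-- sorted set lists are equal iff the sets are equal (both sides Nodup)
theorem pv_sorted_eq_iff_set_equal (a b : List String) :
    (pvNormSortedRules a = pvNormSortedRules b)
      ↔ PySem.Set.equal (normalize_criteria_rules a) (normalize_criteria_rules b) = true := by
  unfold pvNormSortedRules
  rw [PySem.List.sorted_id_eq_sorted_id_iff_perm, PySem.Set.equal_iff,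
    List.perm_ext_iff_of_nodup (PySem.Set.nodup_ofList _) (PySem.Set.nodup_ofList _)]
  rfl

theorem pv_pairwise_lt_of_nodup (l : List (String × List String))
    (hle : l.Pairwise (fun a b => a.1 ≤ b.1)) (hnd : (l.map Prod.fst).Nodup) :
    l.Pairwise (fun a b => a.1 < b.1) := by
  rw [List.nodup_iff_pairwise_ne, List.pairwise_map] at hnd
  exact (hle.and hnd).imp (fun h => lt_of_le_of_ne h.1 h.2)

-- a dict built from a Nodup association list looks up the entry's own value
theorem pv_getD_of_mem (l : List (String × List String)) (kv : String × List String)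
    (hnd : (l.map Prod.fst).Nodup) (hm : kv ∈ l) :
    (PySem.Dict.mk l).getD kv.1 [] = kv.2 := by
  exact PySem.Dict.getD_of_mem_items (d := PySem.Dict.mk l) hm (by simpa using hnd) []

theorem pv_canonical_def (l : List (String × List String)) :
    pvCanonical l = PySem.List.sorted (l.map pvF) (fun item => item.1) false := rfl

theorem pv_canonical_eq_iff_perm (old new : List (String × List String))
    (hn : (new.map Prod.fst).Nodup) :
    pvCanonical old = pvCanonical new ↔ (old.map pvF).Perm (new.map pvF) := by
  rw [pv_canonical_def, pv_canonical_def]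
  constructor
  · intro h
    exact ((PySem.List.sorted_perm (old.map pvF) (fun item => item.1) false).symm.trans
      (h ▸ PySem.List.sorted_perm (new.map pvF) (fun item => item.1) false))
  · intro hp
    exact PySem.List.sorted_eq_of_perm_of_pairwise_lt (old.map pvF)
      (PySem.List.sorted (new.map pvF) (fun item => item.1) false) (fun item => item.1)
      ((PySem.List.sorted_perm (new.map pvF) (fun item => item.1) false).trans hp.symm)
      (pv_pairwise_lt_of_nodup _
        (PySem.List.sorted_pairwise (new.map pvF) (fun item => item.1))
        (by
          have hperm : ((PySem.List.sorted (new.map pvF) (fun item => item.1) false).map Prod.fst).Perm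
              ((new.map pvF).map Prod.fst) :=
            (PySem.List.sorted_perm (new.map pvF) (fun item => item.1) false).map Prod.fst
          rw [pv_map_fst_map_f] at hperm
          exact hperm.nodup_iff.mpr hn))

theorem pv_perm_iff (old new : List (String × List String))
    (ho : (old.map Prod.fst).Nodup) (hn : (new.map Prod.fst).Nodup) :
    (old.map pvF).Perm (new.map pvF)
      ↔ (PySem.Set.equal (PySem.Set.ofList (old.map (·.1))) (PySem.Set.ofList (new.map (·.1))) = true
          ∧ ∀ kv ∈ old, PySem.Set.equal
              (normalize_criteria_rules ((PySem.Dict.mk old).getD kv.1 []))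
              (normalize_criteria_rules ((PySem.Dict.mk new).getD kv.1 [])) = true) := by
  have hfo : (old.map pvF).Nodup := (pv_map_fst_map_f old ▸ ho : ((old.map pvF).map Prod.fst).Nodup).of_map
  have hfn : (new.map pvF).Nodup := (pv_map_fst_map_f new ▸ hn : ((new.map pvF).map Prod.fst).Nodup).of_map
  rw [List.perm_ext_iff_of_nodup hfo hfn]
  constructor
  · intro h
    constructor
    · rw [PySem.Set.equal_iff]
      intro k
      simp only [PySem.Set.mem_ofList, List.mem_map]
      constructor
      · rintro ⟨kv, hkv, rfl⟩
        obtain ⟨kv', hkv', hfe⟩ := List.mem_map.mp ((h (pvF kv)).mp (List.mem_map.mpr ⟨kv, hkv, rfl⟩))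
        have h1 : kv'.1 = kv.1 := by simpa [pvF] using congrArg Prod.fst hfe
        exact ⟨kv', hkv', h1⟩
      · rintro ⟨kv, hkv, rfl⟩
        obtain ⟨kv', hkv', hfe⟩ := List.mem_map.mp ((h (pvF kv)).mpr (List.mem_map.mpr ⟨kv, hkv, rfl⟩))
        have h1 : kv'.1 = kv.1 := by simpa [pvF] using congrArg Prod.fst hfe
        exact ⟨kv', hkv', h1⟩
    · intro kv hkv
      obtain ⟨kv', hkv', hfe⟩ := List.mem_map.mp ((h (pvF kv)).mp (List.mem_map.mpr ⟨kv, hkv, rfl⟩))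
      have h1 : kv'.1 = kv.1 := by simpa [pvF] using congrArg Prod.fst hfe
      have h2 : pvNormSortedRules kv'.2 = pvNormSortedRules kv.2 := by
        simpa [pvF] using congrArg Prod.snd hfe
      have e2 : (PySem.Dict.mk new).getD kv.1 [] = kv'.2 := by
        rw [← h1]; exact pv_getD_of_mem new kv' hn hkv'
      rw [pv_getD_of_mem old kv ho hkv, e2]
      exact (pv_sorted_eq_iff_set_equal _ _).mp h2.symm
  · rintro ⟨hk, hv⟩ x
    rw [PySem.Set.equal_iff] at hk
    constructor
    · intro hx
      obtain ⟨kv, hkv, rfl⟩ := List.mem_map.mp hx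
      have : kv.1 ∈ new.map (·.1) := by
        have := (hk kv.1).mp
        simp only [PySem.Set.mem_ofList] at this
        exact this (List.mem_map.mpr ⟨kv, hkv, rfl⟩)
      obtain ⟨kv', hkv', h1⟩ := List.mem_map.mp this
      have hset := hv kv hkv
      have e2 : (PySem.Dict.mk new).getD kv.1 [] = kv'.2 := by
        rw [← h1]; exact pv_getD_of_mem new kv' hn hkv'
      rw [pv_getD_of_mem old kv ho hkv, e2] at hset
      have h2 : pvNormSortedRules kv.2 = pvNormSortedRules kv'.2 :=
        (pv_sorted_eq_iff_set_equal _ _).mpr hset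
      have hfeq : pvF kv = pvF kv' := by
        unfold pvF; rw [h1, h2]
      exact hfeq ▸ List.mem_map.mpr ⟨kv', hkv', rfl⟩
    · intro hx
      obtain ⟨kv', hkv', rfl⟩ := List.mem_map.mp hx
      have : kv'.1 ∈ old.map (·.1) := by
        have := (hk kv'.1).mpr
        simp only [PySem.Set.mem_ofList] at this
        exact this (List.mem_map.mpr ⟨kv', hkv', rfl⟩)
      obtain ⟨kv, hkv, h1⟩ := List.mem_map.mp this
      have hset := hv kv hkv
      have e2 : (PySem.Dict.mk new).getD kv.1 [] = kv'.2 := by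
        rw [h1]; exact pv_getD_of_mem new kv' hn hkv'
      rw [pv_getD_of_mem old kv ho hkv, e2] at hset
      have h2 : pvNormSortedRules kv.2 = pvNormSortedRules kv'.2 :=
        (pv_sorted_eq_iff_set_equal _ _).mpr hset
      have hfeq : pvF kv' = pvF kv := by
        unfold pvF; rw [← h1, h2]
      exact hfeq ▸ List.mem_map.mpr ⟨kv, hkv, rfl⟩

theorem are_criteria_same_eq (old_criteria : Option (List (String × List String))) (new_criteria : List (String × List String))
    (hpre : Pre_are_criteria_same old_criteria new_criteria) :
    are_criteria_same old_criteria new_criteria = are_criteria_same_alt old_criteria new_criteria := by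
  obtain ⟨ho, hn⟩ := hpre
  cases old_criteria with
  | none => rfl
  | some old =>
    simp only [Option.getD_some] at ho
    rw [Bool.eq_iff_iff]
    simp only [are_criteria_same, are_criteria_same_alt, beq_iff_eq]
    rw [pv_canonical_eq_iff_perm old new_criteria hn, pv_perm_iff old new_criteria ho hn]
    by_cases hk : PySem.Set.equal (PySem.Set.ofList (old.map (·.1))) (PySem.Set.ofList (new_criteria.map (·.1))) = true
    · simp [hk, List.all_eq_true]
    · simp [hk]

-- ===== VERDICT (by name: the statement is the Claim_ definition above) =====
theorem are_criteria_same_spec : Claim_equal_are_criteria_same := by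
  intro o n _ hpre
  unfold Spec_are_criteria_same
  exact are_criteria_same_eq o n hpre
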